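-- pv_equiv track=rewrite | github.com/FedosOnGIT/Machine-Learning | Codeforces/B.F-score.py | calculate_positive
-- ===== SOURCE A (Python) =====
-- def calculate_positive(positive,
--                        matrix,
--                        size):
--     true_positive = 0
--     true_negative = 0
--     false_positive = 0
--     false_negative = 0
--     for column in range(size):
--         if column == positive:
--             true_positive += matrix[positive][positive]
--         else:
--             false_positive += matrix[positive][column]
--             false_negative += matrix[column][positive]
--             true_negative += matrix[column][column]
--     return true_positive, true_negative, false_positive, false_negative
-- ===== SOURCE B (Python) =====
-- def calculate_positive(positive, matrix, size):
--     diagonal = {i: matrix[i][i] for i in range(size)}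
--     tp = diagonal.get(positive, 0)
--     tn = sum(diagonal.values()) - tp
--     fp = sum(matrix[positive][c] for c in range(size)) - tp
--     fn = sum(matrix[r][positive] for r in range(size)) - tp
--     return tp, tn, fp, fn
-- ===== Notes on version B (the rewrite author's own statement) =====
-- stated objective: alternative
-- what changed: Replaces A's single branched accumulating loop by building the diagonal once as an index-to-value dict, taking tp as a dict lookup with default 0, and deriving the other three counts from unbranched whole-line sums (diagonal values, positive row, positive column) each corrected by subtracting tp.
import Mathlib
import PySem

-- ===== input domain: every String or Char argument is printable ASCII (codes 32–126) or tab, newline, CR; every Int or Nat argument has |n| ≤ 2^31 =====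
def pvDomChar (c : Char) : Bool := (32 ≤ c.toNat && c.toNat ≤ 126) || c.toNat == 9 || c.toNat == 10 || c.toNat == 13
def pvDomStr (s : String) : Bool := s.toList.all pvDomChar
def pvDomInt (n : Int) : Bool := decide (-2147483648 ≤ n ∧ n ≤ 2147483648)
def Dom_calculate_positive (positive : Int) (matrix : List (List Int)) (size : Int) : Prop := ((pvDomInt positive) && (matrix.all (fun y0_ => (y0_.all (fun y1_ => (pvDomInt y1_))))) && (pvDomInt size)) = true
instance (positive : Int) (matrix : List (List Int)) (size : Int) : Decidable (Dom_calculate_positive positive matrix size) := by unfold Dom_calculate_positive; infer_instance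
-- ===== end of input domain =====

-- B builds the diagonal once as an index→value dict, takes tp as a lookup with default 0,
-- and derives the other three counts from unbranched whole-line sums minus tp, instead of
-- A's single per-column branched accumulating loop (objective: alternative).

-- matrix[i][j] as an Int, defaulting to 0 where Python's indexing would raise IndexError
def pvGet2 (m : List (List Int)) (i j : Int) : Int :=
  ((PySem.List.pyGet? m i).bind (fun row => PySem.List.pyGet? row j)).getD 0

-- ===== PORT A =====
def calculate_positive (positive : Int) (matrix : List (List Int)) (size : Int) : Int × Int × Int × Int :=
  (PySem.List.pyRange 0 size 1).foldl
    (fun st column =>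
      if column = positive then
        (st.1 + pvGet2 matrix positive positive, st.2.1, st.2.2.1, st.2.2.2)
      else
        (st.1, st.2.1 + pvGet2 matrix column column,
         st.2.2.1 + pvGet2 matrix positive column,
         st.2.2.2 + pvGet2 matrix column positive))
    (0, 0, 0, 0)

-- ===== PORT B =====
def calculate_positive_alt (positive : Int) (matrix : List (List Int)) (size : Int) : Int × Int × Int × Int :=
  let diagonal : PySem.Dict Int Int :=
    (PySem.List.pyRange 0 size 1).foldl (fun d i => d.insert i (pvGet2 matrix i i)) PySem.Dict.empty
  let tp := diagonal.getD positive 0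
  let tn := diagonal.values.sum - tp
  let fp := ((PySem.List.pyRange 0 size 1).map (fun c => pvGet2 matrix positive c)).sum - tp
  let fn := ((PySem.List.pyRange 0 size 1).map (fun r => pvGet2 matrix r positive)).sum - tp
  (tp, tn, fp, fn)

-- ===== PRECONDITION & SPEC =====
-- Pre_: exactly the inputs where every matrix access A performs is in range (Python raises IndexError otherwise).
def Pre_calculate_positive (positive : Int) (matrix : List (List Int)) (size : Int) : Prop :=
  size ≤ 0 ∨
  (PySem.Raise.InRange matrix.length positive ∧
   size ≤ (matrix.length : Int) ∧
   size ≤ (((PySem.List.pyGet? matrix positive).getD []).length : Int) ∧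
   ∀ pr ∈ matrix.zipIdx,
     ((pr.2 : Int) < size ∧ (pr.2 : Int) ≠ positive) →
       (PySem.Raise.InRange pr.1.length positive ∧ (pr.2 : Int) < (pr.1.length : Int)))
instance (positive : Int) (matrix : List (List Int)) (size : Int) : Decidable (Pre_calculate_positive positive matrix size) := by unfold Pre_calculate_positive; infer_instance

def pvWitness_calculate_positive : Int × List (List Int) × Int := (1, [[3, 1], [2, 4]], 2)

def Spec_calculate_positive (positive : Int) (matrix : List (List Int)) (size : Int) (out : Int × Int × Int × Int) : Prop := out = calculate_positive_alt positive matrix size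
instance (positive : Int) (matrix : List (List Int)) (size : Int) (out : Int × Int × Int × Int) : Decidable (Spec_calculate_positive positive matrix size out) := by unfold Spec_calculate_positive; infer_instance

-- ===== CLAIM (what is proved, stated in full; the proofs are below) =====
def Claim_equal_calculate_positive : Prop := ∀ (positive : Int) (matrix : List (List Int)) (size : Int), Dom_calculate_positive positive matrix size → Pre_calculate_positive positive matrix size → Spec_calculate_positive positive matrix size (calculate_positive positive matrix size)

-- ===== LEMMAS AND PROOFS =====

-- A's branched loop, characterised by three line sums and a guarded diagonal term.
theorem pv_key (positive : Int) (matrix : List (List Int)) (n : Nat) :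
    calculate_positive positive matrix (n : Int) =
      (let t := if 0 ≤ positive ∧ positive < (n : Int) then pvGet2 matrix positive positive else 0
       (t, ((PySem.List.pyRange 0 (n : Int) 1).map (fun i => pvGet2 matrix i i)).sum - t,
           ((PySem.List.pyRange 0 (n : Int) 1).map (fun c => pvGet2 matrix positive c)).sum - t,
           ((PySem.List.pyRange 0 (n : Int) 1).map (fun r => pvGet2 matrix r positive)).sum - t)) := by
  induction n with
  | zero =>
      simp [calculate_positive, PySem.List.pyRange_one_eq_nil (le_refl (0:Int))]
  | succ n ih =>
      have hsplit : PySem.List.pyRange 0 ((n + 1 : Nat) : Int) 1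
          = PySem.List.pyRange 0 (n : Int) 1 ++ [(n : Int)] := by
        push_cast
        exact PySem.List.pyRange_one_succ_right (by positivity)
      unfold calculate_positive at ih ⊢
      rw [hsplit]
      simp only [List.foldl_append, List.foldl_cons, List.foldl_nil,
                 List.map_append, List.map_cons, List.map_nil, List.sum_append,
                 List.sum_cons, List.sum_nil]
      rw [ih]
      by_cases h : (n : Int) = positive
      · simp only [if_pos h]
        subst h
        have h1 : (0 ≤ (n:Int) ∧ (n:Int) < ((n+1:Nat):Int)) := by constructor <;> push_cast <;> omega
        have h2 : ¬ (0 ≤ (n:Int) ∧ (n:Int) < (n:Int)) := by omega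
        simp only [if_pos h1, if_neg h2, Prod.mk.injEq]
        refine ⟨by omega, by omega, by omega, by omega⟩
      · simp only [if_neg h]
        have : (0 ≤ positive ∧ positive < ((n+1:Nat):Int)) ↔ (0 ≤ positive ∧ positive < (n:Int)) := by
          constructor <;> intro hp <;> push_cast at * <;> omega
        rw [if_congr this rfl rfl]
        by_cases hp : 0 ≤ positive ∧ positive < (n:Int)
        · simp only [if_pos hp, Prod.mk.injEq]
          refine ⟨trivial, by ring, by ring, by ring⟩
        · simp only [if_neg hp, Prod.mk.injEq]
          refine ⟨trivial, by ring, by ring, by ring⟩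

-- the diagonal dict of B: its items are the enumerated diagonal of the first `size` indices
theorem pv_diag_items (matrix : List (List Int)) (size : Int) :
    ((PySem.List.pyRange 0 size 1).foldl
        (fun d i => d.insert i (pvGet2 matrix i i)) PySem.Dict.empty).items
      = (PySem.List.pyRange 0 size 1).map (fun i => (i, pvGet2 matrix i i)) := by
  have h := PySem.Dict.items_foldl_insert_fresh (PySem.List.pyRange 0 size 1)
      (fun i => i) (fun i => pvGet2 matrix i i) (PySem.Dict.empty)
      (by intro a _; simp [PySem.Dict.contains_empty])
      (by simpa using PySem.List.nodup_pyRange_one 0 size)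
  simpa using h

-- B's tp: the dict lookup equals the guarded diagonal term of pv_key
theorem pv_diag_getD (positive : Int) (matrix : List (List Int)) (size : Int) :
    ((PySem.List.pyRange 0 size 1).foldl
        (fun d i => d.insert i (pvGet2 matrix i i)) PySem.Dict.empty).getD positive 0
      = (if 0 ≤ positive ∧ positive < size then pvGet2 matrix positive positive else 0) := by
  set D := (PySem.List.pyRange 0 size 1).foldl
      (fun d i => d.insert i (pvGet2 matrix i i)) PySem.Dict.empty with hD
  have hkeys : D.keys = PySem.List.pyRange 0 size 1 := by
    rw [hD]
    simp [PySem.Dict.keys, pv_diag_items, List.map_map, Function.comp_def]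
  have hnd : D.keys.Nodup := by
    rw [hkeys]; exact PySem.List.nodup_pyRange_one 0 size
  by_cases hp : 0 ≤ positive ∧ positive < size
  · have hmem : (positive, pvGet2 matrix positive positive) ∈ D.items := by
      rw [pv_diag_items]
      exact List.mem_map_of_mem (PySem.List.mem_pyRange_one.mpr hp)
    rw [if_pos hp]
    exact PySem.Dict.getD_of_mem_items D hmem hnd 0
  · have hnc : D.contains positive = false := by
      rw [← Bool.not_eq_true, PySem.Dict.contains_iff_mem_keys, hkeys,
          PySem.List.mem_pyRange_one]
      exact hp
    rw [if_neg hp]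
    exact PySem.Dict.getD_of_not_contains D 0 hnc

-- B's diagonal total: the dict's values are the diagonal entries
theorem pv_diag_values (matrix : List (List Int)) (size : Int) :
    ((PySem.List.pyRange 0 size 1).foldl
        (fun d i => d.insert i (pvGet2 matrix i i)) PySem.Dict.empty).values
      = (PySem.List.pyRange 0 size 1).map (fun i => pvGet2 matrix i i) := by
  simp [PySem.Dict.values, pv_diag_items, List.map_map, Function.comp_def]

-- ===== VERDICT (by name: the statement is the Claim_ definition above) =====
theorem calculate_positive_spec : Claim_equal_calculate_positive := by
  intro positive matrix size _ _
  unfold Spec_calculate_positive calculate_positive_alt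
  simp only [pv_diag_getD, pv_diag_values]
  by_cases hs : 0 ≤ size
  · have : size = ((size.toNat : Nat) : Int) := by omega
    rw [this, pv_key]
  · have hnil : PySem.List.pyRange 0 size 1 = [] :=
      PySem.List.pyRange_one_eq_nil (by omega)
    simp [calculate_positive, hnil]
    omega
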